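-- pv_equiv track=rewrite | github.com/MysticRyuujin/mirror-bench | src/mirror_bench/discovery/debian.py | _parse_masterlist
-- ===== SOURCE A (Python) =====
-- def _parse_masterlist(text: str) -> list[dict[str, str]]:
--     """Parse RFC822-style multi-record format with blank-line separators."""
--     records: list[dict[str, str]] = []
--     current: dict[str, str] = {}
--     for raw in text.splitlines():
--         if not raw.strip():
--             if current:
--                 records.append(current)
--                 current = {}
--             continue
--         if ":" not in raw:
--             continue
--         key, _, value = raw.partition(":")
--         current[key.strip()] = value.strip()
--     if current:
--         records.append(current)
--     return records
-- ===== SOURCE B (Python) =====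
-- def _parse_masterlist(text: str) -> list[dict[str, str]]:
--     """Parse RFC822-style multi-record format with blank-line separators."""
--     # Phase 1: cut the lines into maximal runs of non-blank lines.
--     lines = text.splitlines()
--     blocks: list[list[str]] = []
--     i, n = 0, len(lines)
--     while i < n:
--         if not lines[i].strip():
--             i += 1
--             continue
--         j = i
--         while j < n and lines[j].strip():
--             j += 1
--         blocks.append(lines[i:j])
--         i = j
--     # Phase 2: one record per block; drop blocks with no "key: value" line.
--     records: list[dict[str, str]] = []
--     for block in blocks:
--         record = {key.strip(): value.strip()
--                   for line in block if ":" in line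
--                   for key, _, value in [line.partition(":")]}
--         if record:
--             records.append(record)
--     return records
-- ===== Notes on version B (the rewrite author's own statement) =====
-- stated objective: alternative
-- what changed: B first splits the lines into maximal non-blank runs (blocks) and then builds one record per block with a dict comprehension, instead of A's single pass with a mutable current-record accumulator and flush-on-blank logic.
import Mathlib
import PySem

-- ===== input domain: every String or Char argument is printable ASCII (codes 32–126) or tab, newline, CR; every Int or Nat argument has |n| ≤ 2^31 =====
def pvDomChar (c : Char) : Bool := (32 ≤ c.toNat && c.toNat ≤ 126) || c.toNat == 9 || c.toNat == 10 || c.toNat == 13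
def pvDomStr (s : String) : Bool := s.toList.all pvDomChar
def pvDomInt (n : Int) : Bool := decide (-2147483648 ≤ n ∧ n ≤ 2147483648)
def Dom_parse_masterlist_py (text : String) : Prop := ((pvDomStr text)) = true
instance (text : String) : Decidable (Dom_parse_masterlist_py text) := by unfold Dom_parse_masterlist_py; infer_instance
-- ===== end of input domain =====

-- B restructures A: split the lines into maximal non-blank runs first, then build one
-- record per run — same cost, a different decomposition (objective: alternative).

-- shared primitive: str.partition(":") restricted to its two used components (key, value);
-- exact when ":" occurs in the string (the only case in which both programs use it)
def pvPartitionColon (s : String) : String × String :=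
  (String.mk (s.toList.takeWhile (· ≠ ':')),
   String.mk ((s.toList.dropWhile (· ≠ ':')).drop 1))

-- ===== PORT A =====
-- one step of A's for-loop: state = (records so far, current record)
def pvStepA (st : List (List (String × String)) × PySem.Dict String String) (raw : String) :
    List (List (String × String)) × PySem.Dict String String :=
  if PySem.Str.strip raw = "" then
    (if st.2.items ≠ [] then (st.1 ++ [st.2.items], PySem.Dict.empty) else st)
  else if PySem.Str.isIn ":" raw = false then st
  else
    let kv := pvPartitionColon raw
    (st.1, st.2.insert (PySem.Str.strip kv.1) (PySem.Str.strip kv.2))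

def parse_masterlist_py (text : String) : List (List (String × String)) :=
  let st := (PySem.Str.splitlines text).foldl pvStepA ([], PySem.Dict.empty)
  if st.2.items ≠ [] then st.1 ++ [st.2.items] else st.1

-- ===== PORT B =====
def pvNonblank (s : String) : Bool := PySem.Str.strip s ≠ ""

-- phase 1 of B: maximal runs of non-blank lines (the index-scanning while loops)
def pvBlocks : List String → List (List String)
  | [] => []
  | l :: ls =>
    if pvNonblank l then
      (l :: ls.takeWhile pvNonblank) :: pvBlocks (ls.dropWhile pvNonblank)
    else
      pvBlocks ls
termination_by ls => ls.length
decreasing_by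
  · simpa using Nat.lt_succ_of_le (ls.length_dropWhile_le pvNonblank)
  · simp

-- phase 2 of B: the dict comprehension over one block
def pvRecord (block : List String) : PySem.Dict String String :=
  block.foldl
    (fun d line =>
      if PySem.Str.isIn ":" line then
        let kv := pvPartitionColon line
        d.insert (PySem.Str.strip kv.1) (PySem.Str.strip kv.2)
      else d)
    PySem.Dict.empty

def parse_masterlist_py_alt (text : String) : List (List (String × String)) :=
  ((pvBlocks (PySem.Str.splitlines text)).map (fun b => (pvRecord b).items)).filter
    (fun r => r ≠ [])

-- ===== PRECONDITION & SPEC =====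
def Spec_parse_masterlist_py (text : String) (out : List (List (String × String))) : Prop := out = parse_masterlist_py_alt text
instance (text : String) (out : List (List (String × String))) : Decidable (Spec_parse_masterlist_py text out) := by unfold Spec_parse_masterlist_py; infer_instance

-- ===== CLAIM (what is proved, stated in full; the proofs are below) =====
def Claim_equal_parse_masterlist_py : Prop := ∀ (text : String), Dom_parse_masterlist_py text → Spec_parse_masterlist_py text (parse_masterlist_py text)

-- ===== LEMMAS AND PROOFS =====

-- A's final flush, as a function of the loop state
def pvFlush (st : List (List (String × String)) × PySem.Dict String String) :
    List (List (String × String)) :=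
  if st.2.items ≠ [] then st.1 ++ [st.2.items] else st.1

-- over a run of non-blank lines, A's loop only accumulates into the current record
theorem foldA_nonblank (block : List String) (hb : ∀ l ∈ block, pvNonblank l = true)
    (records : List (List (String × String))) (d : PySem.Dict String String) :
    block.foldl pvStepA (records, d) =
      (records,
       block.foldl
         (fun d line =>
           if PySem.Str.isIn ":" line then
             let kv := pvPartitionColon line
             d.insert (PySem.Str.strip kv.1) (PySem.Str.strip kv.2)
           else d)
         d) := by
  induction block generalizing d with
  | nil => rfl
  | cons l ls ih =>
    have hl : pvNonblank l = true := hb l (by simp)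
    have hls : ∀ x ∈ ls, pvNonblank x = true := fun x hx => hb x (by simp [hx])
    simp only [pvNonblank, ne_eq, decide_eq_true_eq] at hl
    simp only [List.foldl_cons, pvStepA, if_neg hl]
    cases hc : PySem.Str.isIn ":" l <;> simp [hc, ih hls] <;> rfl

-- a Dict whose items list is empty is the empty Dict
theorem dict_items_nil {κ ν : Type} [BEq κ] (d : PySem.Dict κ ν) (h : d.items = []) :
    d = PySem.Dict.empty := by
  apply PySem.Dict.ext; simpa [PySem.Dict.empty] using h

-- the main invariant: flushing A's fold from a fresh current record yields B's blocks
theorem main_inv (ls : List String) (records : List (List (String × String))) :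
    pvFlush (ls.foldl pvStepA (records, PySem.Dict.empty)) =
      records ++ ((pvBlocks ls).map (fun b => (pvRecord b).items)).filter (fun r => r ≠ []) := by
  match ls with
  | [] => simp [pvFlush, pvBlocks, PySem.Dict.empty]
  | l :: ls' =>
    by_cases hl : pvNonblank l = true
    · -- a block starts here
      have hsplit : ls' = ls'.takeWhile pvNonblank ++ ls'.dropWhile pvNonblank :=
        (List.takeWhile_append_dropWhile (p := pvNonblank) (l := ls')).symm
      have hblk : ∀ x ∈ l :: ls'.takeWhile pvNonblank, pvNonblank x = true := by
        intro x hx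
        rcases hx with _ | hx
        · exact hl
        · exact List.mem_takeWhile_imp (by assumption)
      have h1 : (l :: ls').foldl pvStepA (records, PySem.Dict.empty) =
          (ls'.dropWhile pvNonblank).foldl pvStepA
            (records, pvRecord (l :: ls'.takeWhile pvNonblank)) := by
        conv_lhs => rw [show (l :: ls') =
          (l :: ls'.takeWhile pvNonblank) ++ ls'.dropWhile pvNonblank by
            simp [← hsplit]]
        rw [List.foldl_append, foldA_nonblank _ hblk]
        rfl
      rw [h1, pvBlocks]
      simp only [if_pos hl]
      -- analyse the rest after the block
      rcases hrest : ls'.dropWhile pvNonblank with _ | ⟨b, rest⟩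
      · -- nothing after the block
        simp only [List.foldl_nil, pvFlush, pvBlocks, List.map_cons, List.map_nil,
          List.filter]
        by_cases hne : (pvRecord (l :: ls'.takeWhile pvNonblank)).items = []
        · simp [hne]
        · simp [hne]
      · -- a blank line follows, then the tail
        have hb : pvNonblank b = false := by
          have := List.dropWhile_get_zero_not (p := pvNonblank) (l := ls') (by simp [hrest])
          simpa [hrest] using this
        have hb' : PySem.Str.strip b = "" := by
          simpa [pvNonblank] using hb
        have hlen : rest.length < (l :: ls').length := by
          have : (ls'.dropWhile pvNonblank).length ≤ ls'.length :=
            ls'.length_dropWhile_le pvNonblank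
          rw [hrest] at this
          simp at this ⊢
          omega
        rw [List.foldl_cons]
        have hstep : pvStepA (records, pvRecord (l :: ls'.takeWhile pvNonblank)) b =
            (pvFlush (records, pvRecord (l :: ls'.takeWhile pvNonblank)), PySem.Dict.empty) := by
          simp only [pvStepA, if_pos hb', pvFlush]
          by_cases hne : (pvRecord (l :: ls'.takeWhile pvNonblank)).items = []
          · rw [dict_items_nil _ hne]
            simp [show (PySem.Dict.empty : PySem.Dict String String).items = [] from rfl]
          · simp [hne]
        rw [hstep, main_inv rest]
        simp only [pvFlush, pvBlocks, List.map_cons, List.filter]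
        by_cases hne : (pvRecord (l :: ls'.takeWhile pvNonblank)).items = []
        · simp [hne, hb]
        · simp [hne, hb]
    · -- blank first line with empty current record: a no-op
      have hl' : PySem.Str.strip l = "" := by
        simpa [pvNonblank] using hl
      rw [List.foldl_cons]
      have : pvStepA (records, PySem.Dict.empty) l = (records, PySem.Dict.empty) := by
        simp [pvStepA, hl', PySem.Dict.empty]
      rw [this, main_inv ls', pvBlocks]
      simp [hl]
termination_by ls.length
decreasing_by
  · exact hlen
  · simp

-- ===== VERDICT (by name: the statement is the Claim_ definition above) =====
theorem parse_masterlist_py_spec : Claim_equal_parse_masterlist_py := by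
  intro text _
  unfold Spec_parse_masterlist_py parse_masterlist_py parse_masterlist_py_alt
  simpa [pvFlush] using main_inv (PySem.Str.splitlines text) []
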